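-- pv_equiv track=rewrite | github.com/DiegoAscanio/reuniao-02-03-2026 | experimentos/pipeline.py | solve_bottleneck
-- ===== SOURCE A (Python) =====
-- def solve_bottleneck(current_layer: dict, next_layer: dict) -> dict:
--     '''
--     Gera as conexões base de avanço entre duas camadas adjacentes,
--     aplicando a regra de afunilamento (Teto de Índice) quando a próxima
--     camada possui menos máquinas que a camada atual.
--
--     Argumentos:
--         current_layer: Dicionário contendo os dados da camada atual.
--         next_layer: Dicionário contendo os dados da próxima camada.
--
--     Retorna:
--         Um dicionário mapeando cada máquina da camada atual para uma
--         lista contendo sua máquina de destino na próxima camada.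
--     '''
--     connections = {}
--     curr_machines = current_layer['machines']
--     next_machines = next_layer['machines']
--
--     for i, m_curr in enumerate(curr_machines):
--         # Aplica o Teto de Índice para evitar IndexError e forçar o afunilamento
--         target_idx = min(i, len(next_machines) - 1)
--
--         # Cria a chave e adiciona o destino numa lista (formato de grafo)
--         connections[m_curr] = [next_machines[target_idx]]
--
--     return connections
-- ===== SOURCE B (Python) =====
-- def solve_bottleneck(current_layer: dict, next_layer: dict) -> dict:
--     '''
--     Consumes a reversed working stack of next-layer machines with pop(),
--     holding on to the final element once the stack is down to one: no index
--     arithmetic, no clamping.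
--     '''
--     curr_machines = current_layer['machines']
--     next_machines = next_layer['machines']
--     stack = list(reversed(next_machines))
--     connections = {}
--     for m in curr_machines:
--         target = stack[-1] if len(stack) == 1 else stack.pop()
--         connections[m] = [target]
--     return connections
-- ===== Notes on version B (the rewrite author's own statement) =====
-- stated objective: alternative
-- what changed: Replaces A's enumerate loop with min(i, len(next)-1) index clamping by destructive consumption of a reversed working stack: each current machine pops its target off the stack, and the last element is held (peeked, not popped) once the stack shrinks to one.
import Mathlib
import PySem

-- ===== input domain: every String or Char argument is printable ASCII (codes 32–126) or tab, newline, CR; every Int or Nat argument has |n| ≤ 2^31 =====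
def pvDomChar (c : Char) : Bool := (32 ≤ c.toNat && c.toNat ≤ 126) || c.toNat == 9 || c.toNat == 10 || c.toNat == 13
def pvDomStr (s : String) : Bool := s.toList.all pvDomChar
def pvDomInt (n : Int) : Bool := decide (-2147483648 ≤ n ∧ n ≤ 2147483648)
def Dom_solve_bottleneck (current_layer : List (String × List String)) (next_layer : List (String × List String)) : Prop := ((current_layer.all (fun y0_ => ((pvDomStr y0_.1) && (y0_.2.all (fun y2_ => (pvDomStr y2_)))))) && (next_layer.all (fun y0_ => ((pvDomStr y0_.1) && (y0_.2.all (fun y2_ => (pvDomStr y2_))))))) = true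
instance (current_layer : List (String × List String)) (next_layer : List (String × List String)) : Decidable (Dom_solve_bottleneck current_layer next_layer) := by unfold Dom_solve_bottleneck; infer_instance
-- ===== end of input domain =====

-- B replaces A's index-clamped enumerate loop (min(i, len(next)-1)) by destructive
-- consumption of a reversed working stack: pop a target per machine, hold the last one.
-- ===== PORT A =====
def solve_bottleneck (current_layer : List (String × List String)) (next_layer : List (String × List String)) : List (String × List String) :=
  -- current_layer['machines'] / next_layer['machines']: KeyError (lookup = none) is excluded by Pre_
  let curr_machines := (PySem.Dict.mk current_layer).getD "machines" []
  let next_machines := (PySem.Dict.mk next_layer).getD "machines" []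
  -- for i, m_curr in enumerate(curr_machines): connections[m_curr] = [next_machines[min(i, len(next_machines)-1)]]
  -- next_machines[-1] on empty next_machines raises IndexError in Python; that input is excluded by Pre_
  let connections := (PySem.List.enumerate curr_machines).foldl
    (fun d p => d.insert p.2
      [PySem.List.pyGetD next_machines (min p.1 ((next_machines.length : Int) - 1)) ""])
    PySem.Dict.empty
  connections.items

-- ===== PORT B =====
def solve_bottleneck_alt (current_layer : List (String × List String)) (next_layer : List (String × List String)) : List (String × List String) :=
  let curr_machines := (PySem.Dict.mk current_layer).getD "machines" []
  let next_machines := (PySem.Dict.mk next_layer).getD "machines" []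
  -- stack = list(reversed(next_machines))
  -- for m in curr_machines: target = stack[-1] if len(stack) == 1 else stack.pop(); connections[m] = [target]
  -- stack.pop() reads stack[-1] and drops the last element; pop()/[-1] on an empty stack
  -- raises IndexError in Python, excluded by Pre_ (pyGetD's default is never the value there)
  let st :=
    curr_machines.foldl
      (fun (p : PySem.Dict String (List String) × List String) m =>
        if p.2.length == 1 then
          (p.1.insert m [PySem.List.pyGetD p.2 (-1) ""], p.2)
        else
          (p.1.insert m [PySem.List.pyGetD p.2 (-1) ""], p.2.dropLast))
      (PySem.Dict.empty, next_machines.reverse)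
  st.1.items

-- ===== PRECONDITION & SPEC =====
-- Pre_ excludes exactly the inputs where Python A raises: a missing 'machines' key (KeyError),
-- and a nonempty current layer with an empty next layer (IndexError; Python B raises there too).
def Pre_solve_bottleneck (current_layer : List (String × List String)) (next_layer : List (String × List String)) : Prop :=
  (PySem.Dict.mk current_layer).contains "machines" = true ∧
  (PySem.Dict.mk next_layer).contains "machines" = true ∧
  ((PySem.Dict.mk current_layer).getD "machines" [] = [] ∨
   (PySem.Dict.mk next_layer).getD "machines" [] ≠ [])
instance (current_layer : List (String × List String)) (next_layer : List (String × List String)) : Decidable (Pre_solve_bottleneck current_layer next_layer) := by unfold Pre_solve_bottleneck; infer_instance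
def pvWitness_solve_bottleneck : (List (String × List String)) × (List (String × List String)) :=
  ([("machines", ["a", "b", "c"])], [("machines", ["x", "y"])])
def Spec_solve_bottleneck (current_layer : List (String × List String)) (next_layer : List (String × List String)) (out : List (String × List String)) : Prop := out = solve_bottleneck_alt current_layer next_layer
instance (current_layer : List (String × List String)) (next_layer : List (String × List String)) (out : List (String × List String)) : Decidable (Spec_solve_bottleneck current_layer next_layer out) := by unfold Spec_solve_bottleneck; infer_instance

-- ===== CLAIM =====
def Claim_equal_solve_bottleneck : Prop := ∀ (current_layer : List (String × List String)) (next_layer : List (String × List String)), Dom_solve_bottleneck current_layer next_layer → Pre_solve_bottleneck current_layer next_layer → Spec_solve_bottleneck current_layer next_layer (solve_bottleneck current_layer next_layer)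

-- ===== LEMMAS AND PROOFS =====

-- Invariant: after j machines have been consumed, B's stack is the reverse of
-- nxt with its first min j (len-1) elements dropped; the two folds then agree.
theorem loop_eq (nxt : List String) (hn : nxt ≠ []) :
    ∀ (curr : List String) (j : Nat) (d : PySem.Dict String (List String)),
    (curr.foldl
      (fun (p : PySem.Dict String (List String) × List String) m =>
        if p.2.length == 1 then
          (p.1.insert m [PySem.List.pyGetD p.2 (-1) ""], p.2)
        else
          (p.1.insert m [PySem.List.pyGetD p.2 (-1) ""], p.2.dropLast))
      (d, (nxt.drop (min j (nxt.length - 1))).reverse)).1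
    = (PySem.List.enumerate curr j).foldl
        (fun d p => d.insert p.2
          [PySem.List.pyGetD nxt (min p.1 ((nxt.length : Int) - 1)) ""]) d := by
  intro curr
  induction curr with
  | nil => intro j d; simp [PySem.List.enumerate_nil]
  | cons c cs ih =>
    intro j d
    have hlen : 0 < nxt.length := List.length_pos_iff.mpr hn
    have hk : min j (nxt.length - 1) < nxt.length := by omega
    have hdropne : nxt.drop (min j (nxt.length - 1)) ≠ [] := by
      refine List.ne_nil_of_length_pos ?_
      rw [List.length_drop]; omega
    have hrevne : (nxt.drop (min j (nxt.length - 1))).reverse ≠ [] := by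
      simpa using hdropne
    -- the popped / peeked value is nxt[min j (len-1)]
    have hget : PySem.List.pyGetD (nxt.drop (min j (nxt.length - 1))).reverse (-1) ""
        = PySem.List.pyGetD nxt (min (j : Int) ((nxt.length : Int) - 1)) "" := by
      have hmin : min (j : Int) ((nxt.length : Int) - 1) = ((min j (nxt.length - 1) : Nat) : Int) := by
        push_cast; omega
      rw [PySem.List.pyGetD_neg_one _ "" hrevne, hmin, PySem.List.pyGetD_natCast,
        List.getLast_reverse, List.head_drop, List.getD_eq_getElem _ _ hk]
    rw [PySem.List.enumerate_cons, List.foldl_cons, List.foldl_cons]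
    by_cases h1 : ((nxt.drop (min j (nxt.length - 1))).reverse).length = 1
    · -- stack held: j ≥ len - 1, the drop index is saturated
      have hsat' : min (j + 1) (nxt.length - 1) = min j (nxt.length - 1) := by
        simp only [List.length_reverse, List.length_drop] at h1; omega
      have ihj := ih (j + 1) (d.insert c [PySem.List.pyGetD nxt (min (j : Int) ((nxt.length : Int) - 1)) ""])
      rw [hsat'] at ihj
      push_cast at ihj ⊢
      simpa [h1, hget] using ihj
    · -- stack popped: j < len - 1
      have hj : j < nxt.length - 1 := by
        simp only [List.length_reverse, List.length_drop] at h1; omega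
      have hstep : ((nxt.drop (min j (nxt.length - 1))).reverse).dropLast
          = (nxt.drop (min (j + 1) (nxt.length - 1))).reverse := by
        rw [List.dropLast_reverse]
        congr 1
        rw [List.tail_drop]
        congr 1
        omega
      have ihj := ih (j + 1) (d.insert c [PySem.List.pyGetD nxt (min (j : Int) ((nxt.length : Int) - 1)) ""])
      rw [← hstep] at ihj
      push_cast at ihj ⊢
      have hc2 : ¬ (nxt.length - min j (nxt.length - 1) = 1) := by omega
      simpa [h1, hc2, hget] using ihj

-- ===== VERDICT =====
theorem solve_bottleneck_spec : Claim_equal_solve_bottleneck := by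
  intro current_layer next_layer _ hpre
  obtain ⟨-, -, hcase⟩ := hpre
  unfold Spec_solve_bottleneck solve_bottleneck solve_bottleneck_alt
  rcases hcase with hcurr | hnxt
  · simp only [hcurr, PySem.List.enumerate_nil, List.foldl_nil]
  · have key := loop_eq ((PySem.Dict.mk next_layer).getD "machines" []) hnxt
      ((PySem.Dict.mk current_layer).getD "machines" []) 0 PySem.Dict.empty
    have h0 : min 0 (((PySem.Dict.mk next_layer).getD "machines" []).length - 1) = 0 :=
      Nat.zero_min _
    rw [h0, List.drop_zero] at key
    exact (congrArg PySem.Dict.items key).symm
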